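-- pv_equiv track=rewrite | github.com/NitipoomKlaynium/NeetCode | looloo.py | count_unique_ascending_numbers
-- ===== SOURCE A (Python) =====
-- def count_unique_ascending_numbers (stream):
--     n = len(stream)
--     result = 0
--     temp_lst = []
--     i = 0
--     while i < n:
--         if stream[i].isnumeric() :
--             check = True
--             start = i
--             i += 1
--             while i < n:
--                 if stream[i].isnumeric():
--                     check = check & (stream[i] > stream[i - 1])
--                 else:
--                     temp = stream[start:i]
--                     if check and temp not in temp_lst:
--                         temp_lst.append(temp)
--                         result += 1
--                     break
--                 i += 1
--             else:
--                 temp = stream[start:i]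
--                 if check and temp not in temp_lst:
--                     temp_lst.append(temp)
--                     result += 1
--         else:
--             i += 1
--
--
--     return result
-- ===== SOURCE B (Python) =====
-- def _ascending(t):
--     return all(a < b for a, b in zip(t, t[1:]))
--
--
-- def count_unique_ascending_numbers(stream):
--     tokens = []
--     cur = ""
--     for ch in stream:
--         if ch.isnumeric():
--             cur += ch
--         else:
--             if cur:
--                 tokens.append(cur)
--             cur = ""
--     if cur:
--         tokens.append(cur)
--     return len({t for t in tokens if _ascending(t)})
-- ===== Notes on version B (the rewrite author's own statement) =====
-- stated objective: simpler
-- what changed: A's fused index-walk (nested while loops accumulating a `check` flag, slicing out each run and testing it against a growing list) is replaced by a two-pass tokenize-then-classify decomposition: one linear pass splits the stream into maximal digit runs, then the distinct strictly-ascending runs are counted with a set comprehension.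
import Mathlib
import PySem

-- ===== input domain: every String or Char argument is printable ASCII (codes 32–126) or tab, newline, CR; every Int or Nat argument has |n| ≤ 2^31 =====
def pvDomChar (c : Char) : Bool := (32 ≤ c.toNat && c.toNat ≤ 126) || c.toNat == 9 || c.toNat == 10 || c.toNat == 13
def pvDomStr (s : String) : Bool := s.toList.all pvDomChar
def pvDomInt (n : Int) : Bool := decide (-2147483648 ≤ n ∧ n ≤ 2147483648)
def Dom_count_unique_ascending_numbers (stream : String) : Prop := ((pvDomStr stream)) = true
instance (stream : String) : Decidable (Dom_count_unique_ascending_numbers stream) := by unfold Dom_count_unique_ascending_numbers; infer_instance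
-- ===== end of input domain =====

-- B replaces A's fused index-walk (inner while accumulating `check`) by a two-pass
-- tokenize-then-classify structure (split into maximal digit runs, then count the
-- distinct ascending ones with a set); objective: simpler decomposition, same cost.

-- str.isnumeric(): on the printable-ASCII domain Dom it is exactly str.isdigit, i.e. '0'..'9'.
def pvIsNum (c : Char) : Bool := PySem.Chars.isdigit c

-- ===== PORT A =====
-- inner `while i < n` loop: walks the run, accumulating `check`; returns (i, check)
def pvInnerA (cs : List Char) (n i : Nat) (check : Bool) : Nat × Bool :=
  if i < n then
    if pvIsNum (cs.getD i ' ') then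
      -- stream[i] > stream[i-1] is code-point comparison = Char `<`
      pvInnerA cs n (i + 1) (check && decide (cs.getD (i - 1) ' ' < cs.getD i ' '))
    else (i, check)
  else (i, check)
termination_by n - i

theorem pvInnerA_fst_ge (cs : List Char) (n i : Nat) (check : Bool) :
    i ≤ (pvInnerA cs n i check).1 := by
  fun_induction pvInnerA cs n i check with
  | case1 i check h hd ih => exact Nat.le_of_succ_le ih
  | case2 => exact Nat.le_refl _
  | case3 => exact Nat.le_refl _

-- outer `while i < n` loop over the whole stream, with `result` and `temp_lst`
def pvOuterA (cs : List Char) (n i : Nat) (result : Int) (lst : List (List Char)) : Int :=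
  if h : i < n then
    if pvIsNum (cs.getD i ' ') then
      let p := pvInnerA cs n (i + 1) true
      let temp := PySem.List.slice cs (some (i : Int)) (some (p.1 : Int))  -- stream[start:i]
      if p.2 && !(lst.contains temp) then
        pvOuterA cs n p.1 (result + 1) (lst ++ [temp])
      else
        pvOuterA cs n p.1 result lst
    else
      pvOuterA cs n (i + 1) result lst
  else result
termination_by n - i
decreasing_by
  · have := pvInnerA_fst_ge cs n (i + 1) true; omega
  · have := pvInnerA_fst_ge cs n (i + 1) true; omega
  · omega

def count_unique_ascending_numbers (stream : String) : Int :=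
  pvOuterA stream.toList stream.toList.length 0 0 []

-- ===== PORT B =====
-- all(a < b for a, b in zip(t, t[1:]))
def pvAscending (t : List Char) : Bool :=
  (t.zip t.tail).all (fun p => decide (p.1 < p.2))

-- the body of B's `for ch in stream` tokenizing loop, state = (tokens, cur)
def pvTokStep (st : List (List Char) × List Char) (ch : Char) : List (List Char) × List Char :=
  if pvIsNum ch then (st.1, st.2 ++ [ch])
  else ((if st.2.isEmpty then st.1 else st.1 ++ [st.2]), [])

def count_unique_ascending_numbers_alt (stream : String) : Int :=
  let st := stream.toList.foldl pvTokStep ([], [])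
  let tokens := if st.2.isEmpty then st.1 else st.1 ++ [st.2]
  ((PySem.Set.ofList (tokens.filter pvAscending)).length : Int)

-- ===== PRECONDITION & SPEC =====
def Spec_count_unique_ascending_numbers (stream : String) (out : Int) : Prop := out = count_unique_ascending_numbers_alt stream
instance (stream : String) (out : Int) : Decidable (Spec_count_unique_ascending_numbers stream out) := by unfold Spec_count_unique_ascending_numbers; infer_instance

-- ===== CLAIM (what is proved, stated in full; the proofs are below) =====
def Claim_equal_count_unique_ascending_numbers : Prop := ∀ (stream : String), Dom_count_unique_ascending_numbers stream → Spec_count_unique_ascending_numbers stream (count_unique_ascending_numbers stream)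

-- ===== LEMMAS AND PROOFS =====

-- canonical tokenizer: maximal digit runs of `xs`, with partial current run `cur`
def pvRuns (cur : List Char) : List Char → List (List Char)
  | [] => if cur.isEmpty then [] else [cur]
  | c :: r =>
      if pvIsNum c then pvRuns (cur ++ [c]) r
      else if cur.isEmpty then pvRuns [] r else cur :: pvRuns [] r

theorem pvTok_spec (cs : List Char) (toks : List (List Char)) (cur : List Char) :
    (let st := cs.foldl pvTokStep (toks, cur);
     if st.2.isEmpty then st.1 else st.1 ++ [st.2]) = toks ++ pvRuns cur cs := by
  induction cs generalizing toks cur with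
  | nil => by_cases h : cur.isEmpty <;> simp [pvRuns, h]
  | cons c r ih =>
      by_cases hc : pvIsNum c
      · simp only [List.foldl_cons, pvTokStep, hc, if_pos, pvRuns]
        simpa [hc] using ih toks (cur ++ [c])
      · by_cases hcur : cur.isEmpty
        · obtain rfl : cur = [] := List.isEmpty_iff.mp hcur
          rw [List.foldl_cons, show pvTokStep (toks, []) c = (toks, []) from by simp [pvTokStep, hc]]
          rw [ih toks []]
          simp [pvRuns, hc]
        · rw [List.foldl_cons, show pvTokStep (toks, cur) c = (toks ++ [cur], []) from by
            simp [pvTokStep, hc, hcur]]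
          rw [ih (toks ++ [cur]) []]
          simp [pvRuns, hc, hcur, List.append_assoc]

theorem pvRuns_run (xs cur : List Char) (h : cur.isEmpty = false) :
    pvRuns cur xs = (cur ++ xs.takeWhile pvIsNum) :: pvRuns [] (xs.dropWhile pvIsNum) := by
  induction xs generalizing cur with
  | nil => simp [pvRuns, h]
  | cons c r ih =>
      by_cases hc : pvIsNum c
      · simp [pvRuns, hc, ih]
      · simp [pvRuns, hc, h]

-- chained strict-ascent check used to characterise A's accumulated `check`
def pvChain (p : Char) : List Char → Bool
  | [] => true
  | c :: r => (decide (p < c)) && pvChain c r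

theorem pvAscending_cons (c : Char) (r : List Char) : pvAscending (c :: r) = pvChain c r := by
  induction r generalizing c with
  | nil => rfl
  | cons b r' ih => simp [pvAscending, pvChain, ← ih, List.zip]

theorem pvDrop_takeWhile (l : List Char) (p : Char → Bool) :
    l.drop (l.takeWhile p).length = l.dropWhile p := by
  induction l with
  | nil => simp
  | cons a r ih => by_cases h : p a <;> simp [h, ih]

theorem pvInnerA_spec (cs : List Char) (i : Nat) (check : Bool) (hin : i ≤ cs.length) :
    pvInnerA cs cs.length i check =
      (i + ((cs.drop i).takeWhile pvIsNum).length,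
       check && pvChain (cs.getD (i - 1) ' ') ((cs.drop i).takeWhile pvIsNum)) := by
  fun_induction pvInnerA cs cs.length i check with
  | case1 i check h hd ih =>
      rw [ih (by omega)]
      have hlt : i < cs.length := h
      have hg : cs.getD i ' ' = cs[i] := List.getD_eq_getElem cs ' ' hlt
      have hd' : pvIsNum cs[i] = true := by rwa [hg] at hd
      rw [List.drop_eq_getElem_cons hlt, List.takeWhile_cons]
      simp only [hd', if_pos, List.length_cons, pvChain, Prod.mk.injEq,
        show i + 1 - 1 = i from rfl, hg]
      exact ⟨by omega, by rw [Bool.and_assoc]⟩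
  | case2 i check h hd =>
      have hlt : i < cs.length := h
      have hg : cs.getD i ' ' = cs[i] := List.getD_eq_getElem cs ' ' hlt
      rw [List.drop_eq_getElem_cons hlt, List.takeWhile_cons]
      simp only [hg] at hd
      simp [hd, pvChain]
  | case3 i check h =>
      have : i = cs.length := by omega
      simp [this, pvChain]

theorem pvOuterA_spec (cs : List Char) (i : Nat) (result : Int) (lst : List (List Char))
    (hin : i ≤ cs.length) :
    pvOuterA cs cs.length i result lst =
      result +
        ((((pvRuns [] (cs.drop i)).filter pvAscending).foldl PySem.Set.add lst).length : Int) -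
        (lst.length : Int) := by
  fun_induction pvOuterA cs cs.length i result lst with
  | case1 i result lst h hd p temp hif ih =>
      -- digit head, check true and token fresh: result += 1, lst.append(temp)
      have hlt : i < cs.length := h
      have hp := pvInnerA_spec cs (i + 1) true (by omega)
      set run := ((cs.drop (i + 1)).takeWhile pvIsNum) with hrun
      have hrl : run.length ≤ cs.length - (i + 1) := by
        simpa [hrun] using List.IsPrefix.length_le (List.takeWhile_prefix pvIsNum (l := cs.drop (i+1)))
      have hp1 : p.1 = i + 1 + run.length := by rw [show p = pvInnerA cs cs.length (i+1) true from rfl, hp]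
      have hp2 : p.2 = pvChain (cs.getD i ' ') run := by
        rw [show p = pvInnerA cs cs.length (i+1) true from rfl, hp]; simp
      have htemp : temp = cs.getD i ' ' :: run := by
        rw [show temp = PySem.List.slice cs (some (i : Int)) (some (p.1 : Int)) from rfl, hp1]
        rw [PySem.List.slice_natCast]
        rw [show i + 1 + run.length - i = 1 + run.length by omega]
        rw [List.drop_eq_getElem_cons hlt, Nat.add_comm 1 run.length, List.take_succ_cons,
          ((List.prefix_iff_eq_take).1 (List.takeWhile_prefix pvIsNum)).symm,
          List.getD_eq_getElem cs ' ' hlt]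
      have hdrop : cs.drop p.1 = (cs.drop (i + 1)).dropWhile pvIsNum := by
        rw [hp1, ← pvDrop_takeWhile (cs.drop (i + 1)) pvIsNum, List.drop_drop]
      have hruns : pvRuns [] (cs.drop i) = temp :: pvRuns [] (cs.drop p.1) := by
        rw [List.drop_eq_getElem_cons hlt, pvRuns,
          if_pos (by rwa [List.getD_eq_getElem cs ' ' hlt] at hd),
          pvRuns_run _ _ (by simp), htemp, hdrop]
        simp [List.getElem?_eq_getElem hlt, hrun]
      have hasc : pvAscending temp = p.2 := by
        rw [htemp, pvAscending_cons, hp2]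
      rw [ih (by omega), hruns]
      simp only [Bool.and_eq_true, Bool.not_eq_true'] at hif
      rw [List.filter_cons, hasc]
      simp only [hif.1, if_pos]
      rw [List.foldl_cons, PySem.Set.add,
        show PySem.Set.contains lst temp = lst.contains temp from rfl, hif.2, if_neg (by simp)]
      simp only [List.length_append, List.length_cons, List.length_nil]
      push_cast; ring
  | case2 i result lst h hd p temp hif ih =>
      -- digit head, but check false or token already seen
      have hlt : i < cs.length := h
      have hp := pvInnerA_spec cs (i + 1) true (by omega)
      set run := ((cs.drop (i + 1)).takeWhile pvIsNum) with hrun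
      have hrl : run.length ≤ cs.length - (i + 1) := by
        simpa [hrun] using List.IsPrefix.length_le (List.takeWhile_prefix pvIsNum (l := cs.drop (i+1)))
      have hp1 : p.1 = i + 1 + run.length := by rw [show p = pvInnerA cs cs.length (i+1) true from rfl, hp]
      have hp2 : p.2 = pvChain (cs.getD i ' ') run := by
        rw [show p = pvInnerA cs cs.length (i+1) true from rfl, hp]; simp
      have htemp : temp = cs.getD i ' ' :: run := by
        rw [show temp = PySem.List.slice cs (some (i : Int)) (some (p.1 : Int)) from rfl, hp1]
        rw [PySem.List.slice_natCast]
        rw [show i + 1 + run.length - i = 1 + run.length by omega]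
        rw [List.drop_eq_getElem_cons hlt, Nat.add_comm 1 run.length, List.take_succ_cons,
          ((List.prefix_iff_eq_take).1 (List.takeWhile_prefix pvIsNum)).symm,
          List.getD_eq_getElem cs ' ' hlt]
      have hdrop : cs.drop p.1 = (cs.drop (i + 1)).dropWhile pvIsNum := by
        rw [hp1, ← pvDrop_takeWhile (cs.drop (i + 1)) pvIsNum, List.drop_drop]
      have hruns : pvRuns [] (cs.drop i) = temp :: pvRuns [] (cs.drop p.1) := by
        rw [List.drop_eq_getElem_cons hlt, pvRuns,
          if_pos (by rwa [List.getD_eq_getElem cs ' ' hlt] at hd),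
          pvRuns_run _ _ (by simp), htemp, hdrop]
        simp [List.getElem?_eq_getElem hlt, hrun]
      have hasc : pvAscending temp = p.2 := by
        rw [htemp, pvAscending_cons, hp2]
      rw [ih (by omega), hruns, List.filter_cons, hasc]
      by_cases h2 : p.2 = true
      · have hcont : lst.contains temp = true := by simpa [h2] using hif
        simp [h2, PySem.Set.add, PySem.Set.contains, (by simpa using hcont : temp ∈ lst)]
      · have h2f : p.2 = false := by simpa using h2
        simp [h2f]
  | case3 i result lst h hd ih =>
      -- non-digit head: skip
      have hlt : i < cs.length := h
      rw [ih (by omega), List.drop_eq_getElem_cons hlt, pvRuns,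
        if_neg (by rwa [List.getD_eq_getElem cs ' ' hlt] at hd)]
      simp
  | case4 i result lst h =>
      have : i = cs.length := by omega
      simp [this, pvRuns]

-- ===== VERDICT (by name: the statement is the Claim_ definition above) =====
theorem count_unique_ascending_numbers_spec : Claim_equal_count_unique_ascending_numbers := by
  intro stream _
  show count_unique_ascending_numbers stream = count_unique_ascending_numbers_alt stream
  have ht := pvTok_spec stream.toList [] []
  simp only [List.nil_append] at ht
  show pvOuterA stream.toList stream.toList.length 0 0 [] =
    ((PySem.Set.ofList ((if (stream.toList.foldl pvTokStep ([], [])).2.isEmpty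
        then (stream.toList.foldl pvTokStep ([], [])).1
        else (stream.toList.foldl pvTokStep ([], [])).1 ++
          [(stream.toList.foldl pvTokStep ([], [])).2]).filter pvAscending)).length : Int)
  rw [pvOuterA_spec stream.toList 0 0 [] (Nat.zero_le _), ht, PySem.Set.ofList_eq_foldl]
  simp
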